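-- pv_equiv track=rewrite | github.com/MrBrantCode/unitest_baseline | mut_generate/mist_train_taco/taco_2770/solution.py | calculate_sequences
-- ===== SOURCE A (Python) =====
-- from itertools import accumulate, chain, islice
--
-- MOD = 1000000007
--
-- def calculate_sequences(n, k):
--     def adjswap(n, k):
--         if n == 1:
--             return int(k == 0)
--         permcount = [1] * (k + 1)
--         for nperm in range(3, n + 1):
--             oldpermcount = permcount
--             cumsum = list(accumulate(oldpermcount))
--             permcount = chain(islice(cumsum, nperm), (a - b for (a, b) in zip(islice(cumsum, nperm, None), cumsum)))
--             permcount = [x % MOD for x in permcount]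
--         return permcount[-1]
--
--     def anyswap(n, k):
--         arr = [1] * (k + 1)
--         for i in range(n):
--             arr = [(a + i * b) % MOD for (a, b) in zip(arr, [0] + arr[:-1])]
--         return arr[-1]
--
--     s1 = adjswap(n, k)
--     s2 = anyswap(n, k)
--
--     return s1, s2
-- ===== SOURCE B (Python) =====
-- MOD = 1000000007
--
-- def calculate_sequences(n, k):
--     # B: adjswap multiplies by (1+x+...+x^(m-1)) with a single running
--     # sliding-window sum per layer (no cumulative-sum list, no shifted
--     # subtraction of one); anyswap maintains the raw polynomial coefficients
--     # (elementary symmetric DP) and takes one final sum, instead of carrying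
--     # prefix sums through every layer.
--     def adjswap(n, k):
--         if n == 1:
--             return int(k == 0)
--         row = [1] * (k + 1)
--         for m in range(3, n + 1):
--             new = []
--             s = 0
--             for j in range(len(row)):
--                 s += row[j]
--                 if j >= m:
--                     s -= row[j - m]
--                 new.append(s % MOD)
--             row = new
--         return row[-1]
--
--     def anyswap(n, k):
--         e = [1] + [0] * k
--         for i in range(n):
--             e = [(e[j] + i * (e[j - 1] if j else 0)) % MOD
--                  for j in range(len(e))]
--         return sum(e) % MOD
--
--     return adjswap(n, k), anyswap(n, k)
-- ===== Notes on version B (the rewrite author's own statement) =====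
-- stated objective: alternative
-- what changed: adjswap's layer update multiplies by (1+x+...+x^(m-1)) via one pass maintaining a running sliding-window sum (adding the entering and subtracting the leaving element) instead of A's accumulate/chain/islice prefix-sum list and shifted subtraction; anyswap maintains the raw polynomial coefficients (elementary-symmetric DP) with one final sum instead of carrying prefix sums through every layer.
-- outside the precondition, e.g. on calculate_sequences(3, -1): A raises IndexError, B raises IndexError; on calculate_sequences(1, -1): A raises IndexError, B returns (0, 1)
import Mathlib
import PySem

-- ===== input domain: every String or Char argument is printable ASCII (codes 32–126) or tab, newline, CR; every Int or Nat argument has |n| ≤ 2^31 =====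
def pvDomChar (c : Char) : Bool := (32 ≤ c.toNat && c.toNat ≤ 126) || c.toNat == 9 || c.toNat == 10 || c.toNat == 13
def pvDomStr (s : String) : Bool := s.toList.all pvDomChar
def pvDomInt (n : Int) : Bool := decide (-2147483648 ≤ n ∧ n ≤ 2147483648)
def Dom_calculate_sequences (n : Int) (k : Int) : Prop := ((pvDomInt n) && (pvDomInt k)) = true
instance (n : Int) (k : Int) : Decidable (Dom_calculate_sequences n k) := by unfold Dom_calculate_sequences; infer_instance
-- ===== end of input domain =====

-- B replaces A's cumulative-sum-list/shifted-subtraction layer by a single pass keeping a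
-- running sliding-window sum, and carries raw polynomial coefficients (summed once at the end)
-- instead of prefix sums: an alternative decomposition of the same cost, equal on 0 ≤ k.

-- ===== PORT A =====
def pvMOD : Int := 1000000007

-- itertools.accumulate: running prefix sums starting from c (c = 0 at the call site);
-- written with a reversed accumulator so the interpreter evaluates it iteratively
def pvAcclAux (c : Int) (acc : List Int) : List Int → List Int
  | [] => acc.reverse
  | x :: t => pvAcclAux (c + x) ((c + x) :: acc) t

def pvAccl (c : Int) (l : List Int) : List Int := pvAcclAux c [] l

-- one loop body of A's adjswap: chain(islice(cumsum, m), (a-b …)) then % MOD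
-- (m comes from range(3, n+1), so m ≥ 3 and m.toNat is exact)
def pvStepA (m : Int) (pc : List Int) : List Int :=
  let cs := pvAccl 0 pc
  ((cs.take m.toNat) ++ (List.zipWith (fun a b => a - b) (cs.drop m.toNat) cs)).map (· % pvMOD)

-- permcount[-1]: Pre_ (0 ≤ k) makes the list nonempty, so the .getD 0 default is never used
def pvAdjswapA (n : Int) (k : Int) : Int :=
  if n = 1 then (if k = 0 then 1 else 0)
  else
    let pc := (PySem.List.pyRange 3 (n + 1) 1).foldl (fun pc m => pvStepA m pc)
      (List.replicate (k + 1).toNat 1)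
    (PySem.List.pyGet? pc (-1)).getD 0

-- A's anyswap: zip(arr, [0] + arr[:-1]) elementwise (a + i*b) % MOD
def pvAnyswapA (n : Int) (k : Int) : Int :=
  let arr := (PySem.List.pyRange 0 n 1).foldl
    (fun arr i => List.zipWith (fun a b => (a + i * b) % pvMOD) arr (0 :: arr.dropLast))
    (List.replicate (k + 1).toNat 1)
  (PySem.List.pyGet? arr (-1)).getD 0

def calculate_sequences (n : Int) (k : Int) : Int × Int :=
  (pvAdjswapA n k, pvAnyswapA n k)

-- ===== PORT B =====
-- one loop body of B's adjswap: a single pass with a running sliding-window sum s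
-- (s += row[j]; if j >= m: s -= row[j-m]; new.append(s % MOD)); the Python list is
-- random-access so the port indexes an Array view of it, and new.append builds the
-- output through a reversed accumulator (m comes from range(3, n+1), so m ≥ 3)
def pvStepB (m : Int) (row : List Int) : List Int :=
  let ra := row.toArray
  ((List.range row.length).foldl
    (fun (st : Int × List Int) j =>
      let s1 := st.1 + ra.getD j 0
      let s2 := if m ≤ (j : Int) then s1 - ra.getD (j - m.toNat) 0 else s1
      (s2, s2 % pvMOD :: st.2)) ((0 : Int), ([] : List Int))).2.reverse

def pvAdjswapB (n : Int) (k : Int) : Int :=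
  if n = 1 then (if k = 0 then 1 else 0)
  else
    let row := (PySem.List.pyRange 3 (n + 1) 1).foldl (fun row m => pvStepB m row)
      (List.replicate (k + 1).toNat 1)
    (PySem.List.pyGet? row (-1)).getD 0

-- one loop body of B's anyswap: e[j] + i * (e[j-1] if j else 0), all mod MOD
def pvStepE (i : Int) (e : List Int) : List Int :=
  let ea := e.toArray
  (List.range e.length).map
    (fun j => (ea.getD j 0 + i * (if j = 0 then 0 else ea.getD (j - 1) 0)) % pvMOD)

def pvAnyswapB (n : Int) (k : Int) : Int :=
  let e := (PySem.List.pyRange 0 n 1).foldl (fun e i => pvStepE i e)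
    (1 :: List.replicate k.toNat 0)
  (e.foldl (· + ·) 0) % pvMOD

def calculate_sequences_alt (n : Int) (k : Int) : Int × Int :=
  (pvAdjswapB n k, pvAnyswapB n k)

-- ===== PRECONDITION & SPEC =====
-- For k < 0 the Python A indexes an empty list with [-1] and raises IndexError; Pre_ excludes that.
def Pre_calculate_sequences (n : Int) (k : Int) : Prop := 0 ≤ k
instance (n : Int) (k : Int) : Decidable (Pre_calculate_sequences n k) := by
  unfold Pre_calculate_sequences; infer_instance

def pvWitness_calculate_sequences : Int × Int := (4, 3)

def Spec_calculate_sequences (n : Int) (k : Int) (out : Int × Int) : Prop :=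
  out = calculate_sequences_alt n k
instance (n : Int) (k : Int) (out : Int × Int) : Decidable (Spec_calculate_sequences n k out) := by
  unfold Spec_calculate_sequences; infer_instance

-- ===== CLAIM (what is proved, stated in full; the proofs are below) =====
def Claim_equal_calculate_sequences : Prop := ∀ (n : Int) (k : Int),
  Dom_calculate_sequences n k → Pre_calculate_sequences n k →
    Spec_calculate_sequences n k (calculate_sequences n k)

-- ===== LEMMAS AND PROOFS =====

theorem pvAcclAux_eq (c : Int) (acc : List Int) (l : List Int) :
    pvAcclAux c acc l = acc.reverse ++ pvAcclAux c [] l := by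
  induction l generalizing c acc with
  | nil => simp [pvAcclAux]
  | cons x t ih =>
    rw [pvAcclAux, pvAcclAux, ih (c + x) ((c + x) :: acc), ih (c + x) [(c + x)]]
    simp

theorem pvAccl_cons (c : Int) (x : Int) (t : List Int) :
    pvAccl c (x :: t) = (c + x) :: pvAccl (c + x) t := by
  unfold pvAccl
  rw [pvAcclAux, pvAcclAux_eq (c + x) [c + x] t]
  simp

theorem pvAccl_length (c : Int) (l : List Int) : (pvAccl c l).length = l.length := by
  induction l generalizing c with
  | nil => rfl
  | cons x t ih => rw [pvAccl_cons]; simp [ih]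

theorem pvAccl_getD (c : Int) (l : List Int) (j : Nat) (hj : j < l.length) :
    (pvAccl c l).getD j 0 = c + (l.take (j + 1)).sum := by
  induction l generalizing c j with
  | nil => simp at hj
  | cons x t ih =>
    rw [pvAccl_cons]
    cases j with
    | zero => simp
    | succ j =>
      simp only [List.getD_cons_succ, List.take_succ_cons, List.sum_cons]
      rw [ih (c + x) j (by simpa using hj)]
      ring

theorem sum_take_succ (l : List Int) (t : Nat) (ht : t < l.length) :
    (l.take (t + 1)).sum = (l.take t).sum + l.getD t 0 := by
  rw [List.take_succ, List.sum_append, List.getD_eq_getElem l 0 ht]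
  simp [List.getElem?_eq_getElem ht]

theorem pvGetD_toArray (l : List Int) (i : Nat) : l.toArray.getD i 0 = l.getD i 0 := by
  rcases Nat.lt_or_ge i l.length with h | h
  · simp [Array.getD, h]
  · simp [Array.getD, Nat.not_lt.mpr h, List.getD]

-- the value both step functions put at position j: window sum of the old row, mod
def pvChar (row : List Int) (mt : Nat) (j : Nat) : Int :=
  ((row.take (j + 1)).sum - (row.take (j + 1 - mt)).sum) % pvMOD

theorem pv_mod_combine (a b i : Int) :
    (a % pvMOD + i * (b % pvMOD)) % pvMOD = (a + i * b) % pvMOD := by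
  conv_rhs => rw [Int.add_emod, Int.mul_emod]
  rw [Int.add_emod, Int.mul_emod i (b % pvMOD), Int.emod_emod_of_dvd _ dvd_rfl,
    Int.emod_emod_of_dvd _ dvd_rfl]

theorem pvStepB_fold (m : Int) (hm : 3 ≤ m) (row : List Int) (t : Nat) (ht : t ≤ row.length) :
    (List.range t).foldl
      (fun (st : Int × List Int) j =>
        let s1 := st.1 + row.toArray.getD j 0
        let s2 := if m ≤ (j : Int) then s1 - row.toArray.getD (j - m.toNat) 0 else s1
        (s2, s2 % pvMOD :: st.2)) ((0 : Int), ([] : List Int))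
    = ((row.take t).sum - (row.take (t - m.toNat)).sum,
       ((List.range t).map (pvChar row m.toNat)).reverse) := by
  induction t with
  | zero => simp
  | succ t ih =>
    rw [List.range_succ, List.foldl_append, ih (by omega)]
    simp only [List.foldl_cons, List.foldl_nil, List.map_append, List.map_cons, List.map_nil,
      List.reverse_append, List.reverse_cons, List.reverse_nil, List.nil_append,
      List.singleton_append]
    have hget : row.toArray.getD t 0 = row.getD t 0 := pvGetD_toArray row t
    have hsum : (row.take (t + 1)).sum = (row.take t).sum + row.getD t 0 :=
      sum_take_succ row t (by omega)
    have hmt : (m ≤ (t : Int)) ↔ (m.toNat ≤ t) := by omega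
    by_cases hc : m.toNat ≤ t
    · have hgd : row.toArray.getD (t - m.toNat) 0 = row.getD (t - m.toNat) 0 :=
        pvGetD_toArray row (t - m.toNat)
      have hsub : (row.take (t - m.toNat + 1)).sum
          = (row.take (t - m.toNat)).sum + row.getD (t - m.toNat) 0 :=
        sum_take_succ row (t - m.toNat) (by omega)
      have h1 : (t + 1) - m.toNat = (t - m.toNat) + 1 := by omega
      simp only [hget, hgd, if_pos (hmt.mpr hc), Prod.mk.injEq]
      constructor
      · rw [hsum, h1, hsub]; ring
      · unfold pvChar
        congr 2
        rw [hsum, h1, hsub]; ring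
    · have h0 : (t + 1) - m.toNat = 0 := by omega
      have h0' : t - m.toNat = 0 := by omega
      simp only [hget, if_neg (fun h => hc (hmt.mp h)), Prod.mk.injEq]
      constructor
      · rw [hsum, h0, h0']; ring
      · unfold pvChar
        congr 2
        rw [hsum, h0, h0']; ring

theorem pvStepB_char (m : Int) (hm : 3 ≤ m) (row : List Int) :
    pvStepB m row = (List.range row.length).map (pvChar row m.toNat) := by
  unfold pvStepB
  show ((List.range row.length).foldl
      (fun (st : Int × List Int) j =>
        let s1 := st.1 + row.toArray.getD j 0
        let s2 := if m ≤ (j : Int) then s1 - row.toArray.getD (j - m.toNat) 0 else s1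
        (s2, s2 % pvMOD :: st.2)) ((0 : Int), ([] : List Int))).2.reverse
    = (List.range row.length).map (pvChar row m.toNat)
  rw [pvStepB_fold m hm row row.length (le_refl _)]
  simp

theorem pvStepA_char (m : Int) (pc : List Int) :
    pvStepA m pc = (List.range pc.length).map (pvChar pc m.toNat) := by
  unfold pvStepA
  have hcl : (pvAccl 0 pc).length = pc.length := pvAccl_length 0 pc
  apply List.ext_getElem
  · simp only [List.length_map, List.length_append, List.length_take, List.length_drop,
      List.length_zipWith, List.length_range, hcl]
    omega
  · intro j h1 h2
    have hj : j < pc.length := by simpa using h2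
    simp only [List.getElem_map, List.getElem_range]
    by_cases hcase : j < m.toNat
    · have hlt : j < ((pvAccl 0 pc).take m.toNat).length := by
        simp only [List.length_take, hcl]; omega
      rw [List.getElem_append_left hlt, List.getElem_take]
      have hc : (pvAccl 0 pc)[j] = (pvAccl 0 pc).getD j 0 :=
        (List.getD_eq_getElem _ 0 (by omega)).symm
      rw [hc, pvAccl_getD 0 pc j hj]
      unfold pvChar
      have h0 : j + 1 - m.toNat = 0 := by omega
      rw [h0]
      simp
    · have hmle : m.toNat ≤ j := by omega
      have hlen1 : ((pvAccl 0 pc).take m.toNat).length = m.toNat := by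
        simp only [List.length_take, hcl]; omega
      rw [List.getElem_append_right (by omega), List.getElem_zipWith]
      have e1 : ((pvAccl 0 pc).drop m.toNat)[j - ((pvAccl 0 pc).take m.toNat).length]'(by simp only [List.length_take, List.length_drop, hcl]; omega) =
          (pvAccl 0 pc)[m.toNat + (j - m.toNat)]'(by simp only [hcl]; omega) := by
        rw [List.getElem_drop]
        congr 1
        omega
      rw [e1]
      have e2 : (pvAccl 0 pc)[m.toNat + (j - m.toNat)]'(by simp only [hcl]; omega)
          = 0 + (pc.take (j + 1)).sum := by
        rw [← List.getD_eq_getElem _ 0]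
        have : m.toNat + (j - m.toNat) = j := by omega
        rw [this, pvAccl_getD 0 pc j hj]
      have e3 : (pvAccl 0 pc)[j - ((pvAccl 0 pc).take m.toNat).length]'(by simp only [List.length_take, hcl]; omega)
          = 0 + (pc.take (j - m.toNat + 1)).sum := by
        rw [← List.getD_eq_getElem _ 0]
        rw [hlen1, pvAccl_getD 0 pc (j - m.toNat) (by omega)]
      rw [e2, e3]
      unfold pvChar
      have : j + 1 - m.toNat = j - m.toNat + 1 := by omega
      rw [this]
      ring_nf

theorem pvStep_eq (m : Int) (hm : 3 ≤ m) (pc : List Int) : pvStepA m pc = pvStepB m pc := by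
  rw [pvStepA_char, pvStepB_char m hm]

theorem pvStep_foldl_eq (l : List Int) (hl : ∀ x ∈ l, 3 ≤ x) (init : List Int) :
    l.foldl (fun pc m => pvStepA m pc) init = l.foldl (fun pc m => pvStepB m pc) init := by
  induction l generalizing init with
  | nil => rfl
  | cons m t ih =>
    rw [List.foldl_cons, List.foldl_cons, pvStep_eq m (hl m (by simp)) init]
    exact ih (fun x hx => hl x (by simp [hx])) _

-- sum over take w expressed as a sum over indices via getD (getD is 0 out of range)
def pvSG (e : List Int) (w : Nat) : Int := ((List.range w).map (fun t => e.getD t 0)).sum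

theorem pvSG_eq_sum_take (e : List Int) (w : Nat) (hw : w ≤ e.length) :
    pvSG e w = (e.take w).sum := by
  induction w with
  | zero => simp [pvSG]
  | succ w ih =>
    have : pvSG e (w + 1) = pvSG e w + e.getD w 0 := by
      simp [pvSG, List.range_succ]
    rw [this, ih (by omega), sum_take_succ e w (by omega)]

-- summing modded terms then modding = modding the raw sum
theorem mod_sum_map (g : Nat → Int) (w : Nat) :
    ((List.range w).map (fun t => g t % pvMOD)).sum % pvMOD
      = ((List.range w).map g).sum % pvMOD := by
  induction w with
  | zero => rfl
  | succ w ih =>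
    simp only [List.range_succ, List.map_append, List.sum_append, List.map_cons, List.map_nil,
      List.sum_cons, List.sum_nil, add_zero]
    rw [Int.add_emod, ih, ← Int.add_emod]
    rw [Int.add_emod _ (g w % pvMOD), Int.emod_emod_of_dvd _ dvd_rfl, ← Int.add_emod]

theorem pvRawSum (e : List Int) (i : Int) (w : Nat) :
    ((List.range w).map
      (fun t => e.getD t 0 + i * (if t = 0 then 0 else e.getD (t - 1) 0))).sum
      = pvSG e w + i * pvSG e (w - 1) := by
  induction w with
  | zero => simp [pvSG]
  | succ w ih =>
    have hr : ((List.range (w + 1)).map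
        (fun t => e.getD t 0 + i * (if t = 0 then 0 else e.getD (t - 1) 0))).sum
        = ((List.range w).map
            (fun t => e.getD t 0 + i * (if t = 0 then 0 else e.getD (t - 1) 0))).sum
          + (e.getD w 0 + i * (if w = 0 then 0 else e.getD (w - 1) 0)) := by
      simp [List.range_succ]
    have hS : ∀ v : Nat, pvSG e (v + 1) = pvSG e v + e.getD v 0 := by
      intro v; simp [pvSG, List.range_succ]
    rw [hr, ih]
    rcases Nat.eq_zero_or_pos w with hw | hw
    · subst hw; simp [pvSG, hS]
    · obtain ⟨v, rfl⟩ : ∃ v, w = v + 1 := ⟨w - 1, by omega⟩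
      simp only [Nat.add_sub_cancel, if_neg (Nat.succ_ne_zero v)]
      rw [hS (v + 1), hS v]
      ring

-- the invariant tying A's prefix-sum array to B's coefficient list
def pvInv (arr e : List Int) : Prop :=
  arr.length = e.length ∧ ∀ j < arr.length, arr.getD j 0 = pvSG e (j + 1) % pvMOD

theorem pvInv_init (kn : Nat) :
    pvInv (List.replicate (kn + 1) 1) (1 :: List.replicate kn 0) := by
  constructor
  · simp
  · intro j hj
    have h1 : (List.replicate (kn + 1) (1 : Int)).getD j 0 = 1 := by
      rw [List.getD_eq_getElem _ 0 (by simpa using hj)]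
      simp
    have h2 : ∀ t : Nat, pvSG (1 :: List.replicate kn 0) (t + 1) = 1 := by
      intro t
      induction t with
      | zero => simp [pvSG]
      | succ t ih =>
        have : pvSG (1 :: List.replicate kn 0) (t + 1 + 1)
            = pvSG (1 :: List.replicate kn 0) (t + 1)
              + (1 :: List.replicate kn (0 : Int)).getD (t + 1) 0 := by
          simp [pvSG, List.range_succ]
        rw [this, ih]
        have : (1 :: List.replicate kn (0 : Int)).getD (t + 1) 0 = 0 := by
          simp [List.getD, List.getElem?_replicate]
          split <;> simp
        rw [this, add_zero]
    rw [h1, h2 j]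
    decide

theorem pvInv_step (i : Int) (arr e : List Int) (h : pvInv arr e) :
    pvInv (List.zipWith (fun a b => (a + i * b) % pvMOD) arr (0 :: arr.dropLast)) (pvStepE i e) := by
  obtain ⟨hlen, hinv⟩ := h
  have hlenz : (List.zipWith (fun a b => (a + i * b) % pvMOD) arr (0 :: arr.dropLast)).length
      = arr.length := by
    simp only [List.length_zipWith, List.length_cons, List.length_dropLast]
    omega
  have harr : ∀ t (ht : t < arr.length), arr[t]'ht = pvSG e (t + 1) % pvMOD := by
    intro t ht
    rw [← List.getD_eq_getElem arr 0 ht]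
    exact hinv t ht
  constructor
  · rw [hlenz, hlen]
    simp [pvStepE]
  · intro j hj
    rw [hlenz] at hj
    have hje : j < e.length := by omega
    have hlhs : (List.zipWith (fun a b => (a + i * b) % pvMOD) arr (0 :: arr.dropLast)).getD j 0
        = (arr[j]'hj + i * (0 :: arr.dropLast)[j]'(by simp only [List.length_cons, List.length_dropLast]; omega)) % pvMOD := by
      rw [List.getD_eq_getElem _ 0 (by omega), List.getElem_zipWith]
    have hE : ∀ t, t < e.length → (pvStepE i e).getD t 0
        = (e.getD t 0 + i * (if t = 0 then 0 else e.getD (t - 1) 0)) % pvMOD := by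
      intro t ht
      rw [pvStepE, List.getD_eq_getElem _ 0 (by simp only [List.length_map, List.length_range]; omega)]
      simp
    have hSG : pvSG (pvStepE i e) (j + 1)
        = ((List.range (j + 1)).map
            (fun t => (e.getD t 0 + i * (if t = 0 then 0 else e.getD (t - 1) 0)) % pvMOD)).sum := by
      unfold pvSG
      refine congrArg _ (List.map_congr_left ?_)
      intro t ht
      exact hE t (by have := List.mem_range.mp ht; omega)
    rw [hlhs, hSG, mod_sum_map, pvRawSum]
    simp only [Nat.add_sub_cancel]
    cases j with
    | zero =>
      have h0 : (0 :: arr.dropLast)[0]'(by simp) = (0 : Int) := rfl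
      rw [h0, harr 0 (by omega)]
      simp [pvSG, Int.emod_emod_of_dvd _ dvd_rfl]
    | succ t =>
      have hd : (0 :: arr.dropLast)[t + 1]'(by simp only [List.length_cons, List.length_dropLast]; omega) = arr[t]'(by omega) := by
        simp [List.getElem_cons_succ, List.getElem_dropLast]
      rw [hd, harr (t + 1) hj, harr t (by omega)]
      exact pv_mod_combine _ _ _

theorem pvInv_fold (is : List Int) (arr e : List Int) (h : pvInv arr e) :
    pvInv (is.foldl (fun arr i => List.zipWith (fun a b => (a + i * b) % pvMOD) arr (0 :: arr.dropLast)) arr)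
          (is.foldl (fun e i => pvStepE i e) e) := by
  induction is generalizing arr e with
  | nil => exact h
  | cons i t ih => exact ih _ _ (pvInv_step i arr e h)

theorem pvStepE_foldl_length (js : List Int) (e0 : List Int) :
    (js.foldl (fun e i => pvStepE i e) e0).length = e0.length := by
  induction js generalizing e0 with
  | nil => rfl
  | cons i t ih =>
    rw [List.foldl_cons, ih (pvStepE i e0)]
    simp [pvStepE]

theorem pvAnyswap_eq (n k : Int) (hk : 0 ≤ k) : pvAnyswapA n k = pvAnyswapB n k := by
  unfold pvAnyswapA pvAnyswapB
  have hkk : (k + 1).toNat = k.toNat + 1 := by omega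
  rw [hkk]
  have hinv := pvInv_fold (PySem.List.pyRange 0 n 1)
    (List.replicate (k.toNat + 1) 1) (1 :: List.replicate k.toNat 0) (pvInv_init k.toNat)
  obtain ⟨hlen, hget⟩ := hinv
  have heLen : ((PySem.List.pyRange 0 n 1).foldl (fun e i => pvStepE i e)
      (1 :: List.replicate k.toNat 0)).length = k.toNat + 1 := by
    simp [pvStepE_foldl_length]
  have haLen : ((PySem.List.pyRange 0 n 1).foldl
      (fun arr i => List.zipWith (fun a b => (a + i * b) % pvMOD) arr (0 :: arr.dropLast))
      (List.replicate (k.toNat + 1) 1)).length = k.toNat + 1 := by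
    rw [hlen, heLen]
  set arrF := (PySem.List.pyRange 0 n 1).foldl
      (fun arr i => List.zipWith (fun a b => (a + i * b) % pvMOD) arr (0 :: arr.dropLast))
      (List.replicate (k.toNat + 1) 1) with harrF
  set eF := (PySem.List.pyRange 0 n 1).foldl (fun e i => pvStepE i e)
      (1 :: List.replicate k.toNat 0) with heF
  have hA : PySem.List.pyGet? arrF (-1) = some (arrF.getD k.toNat 0) := by
    rw [PySem.List.pyGet?_neg_one, List.getLast?_eq_getElem?, haLen]
    simp only [Nat.add_sub_cancel]
    rw [List.getD_eq_getElem _ 0 (by omega), List.getElem?_eq_getElem (by omega)]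
  show (PySem.List.pyGet? arrF (-1)).getD 0 = eF.foldl (· + ·) 0 % pvMOD
  rw [hA]
  simp only [Option.getD_some]
  rw [hget k.toNat (by omega)]
  have hsum : pvSG eF (k.toNat + 1) = eF.sum := by
    rw [← heLen, pvSG_eq_sum_take eF eF.length (le_refl _), List.take_length]
  have hfold : eF.foldl (· + ·) 0 = eF.sum := by
    rw [PySem.List.foldl_add (g := fun x => x)]
    simp
  rw [hsum, hfold]

theorem pvAdjswap_eq (n k : Int) : pvAdjswapA n k = pvAdjswapB n k := by
  unfold pvAdjswapA pvAdjswapB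
  rw [pvStep_foldl_eq (PySem.List.pyRange 3 (n + 1) 1)
    (fun x hx => (PySem.List.mem_pyRange_one.mp hx).1)]

-- ===== VERDICT (by name: the statement is the Claim_ definition above) =====
theorem calculate_sequences_spec : Claim_equal_calculate_sequences := by
  intro n k _ hk
  unfold Pre_calculate_sequences at hk
  unfold Spec_calculate_sequences calculate_sequences calculate_sequences_alt
  exact Prod.ext (pvAdjswap_eq n k) (pvAnyswap_eq n k hk)
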